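-- pv_equiv track=rewrite | github.com/rileychapman/SoftDes | exam/exam.py | pair_to_list_dictionary
-- ===== SOURCE A (Python) =====
-- def pair_to_list_dictionary(l):
-- 	d = {}
-- 	end = len(l)
-- 	i = 0
-- 	while i <= end-2:
-- 		d[l[i]] = l[i+1]
-- 		i += 2
-- 	return d
-- ===== SOURCE B (Python) =====
-- def pair_to_list_dictionary(l):
-- 	it = iter(l)
-- 	return dict(zip(it, it))
-- ===== Notes on version B (the rewrite author's own statement) =====
-- stated objective: idiomatic
-- what changed: Replaces the manual index-based while loop with step-2 subscripting by the standard shared-iterator pairing idiom dict(zip(it, it)), which consumes the list once with no indices or explicit loop.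
import Mathlib
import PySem

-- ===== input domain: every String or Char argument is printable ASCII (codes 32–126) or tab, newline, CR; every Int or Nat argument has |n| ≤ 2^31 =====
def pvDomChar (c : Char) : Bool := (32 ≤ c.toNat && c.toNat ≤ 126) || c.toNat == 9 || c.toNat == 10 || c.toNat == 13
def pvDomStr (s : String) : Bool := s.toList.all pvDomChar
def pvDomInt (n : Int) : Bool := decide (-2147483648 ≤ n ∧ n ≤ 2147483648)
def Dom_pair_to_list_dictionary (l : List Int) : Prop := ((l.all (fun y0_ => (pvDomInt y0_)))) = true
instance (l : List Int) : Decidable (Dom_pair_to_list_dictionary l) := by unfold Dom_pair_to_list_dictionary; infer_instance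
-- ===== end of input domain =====

-- B replaces A's index-based while loop by the shared-iterator idiom dict(zip(it, it)) (idiomatic; same cost).

-- ===== PORT A =====
-- while i <= end-2: d[l[i]] = l[i+1]; i += 2   (indexing is always in range here, so the none branch is unreachable)
def pairLoopA (l : List Int) (endd : Int) (i : Int) (d : PySem.Dict Int Int) : PySem.Dict Int Int :=
  if _h : i ≤ endd - 2 then
    match PySem.List.pyGet? l i, PySem.List.pyGet? l (i + 1) with
    | some k, some v => pairLoopA l endd (i + 2) (d.insert k v)
    | _, _ => d
  else d
termination_by (endd - i).toNat
decreasing_by omega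

def pair_to_list_dictionary (l : List Int) : List (Int × Int) :=
  (pairLoopA l (l.length : Int) 0 PySem.Dict.empty).items

-- ===== PORT B =====
-- zip(it, it) over one shared iterator yields the consecutive (even-index, odd-index) pairs,
-- dropping a trailing unpaired element: ported exactly as this structural pairing.
def zipSelf (l : List Int) : List (Int × Int) :=
  match l with
  | a :: b :: t => (a, b) :: zipSelf t
  | _ => []

def pair_to_list_dictionary_alt (l : List Int) : List (Int × Int) :=
  (PySem.Dict.ofList (zipSelf l)).items

-- ===== PRECONDITION & SPEC =====
def Spec_pair_to_list_dictionary (l : List Int) (out : List (Int × Int)) : Prop := out = pair_to_list_dictionary_alt l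
instance (l : List Int) (out : List (Int × Int)) : Decidable (Spec_pair_to_list_dictionary l out) := by unfold Spec_pair_to_list_dictionary; infer_instance

-- ===== CLAIM (what is proved, stated in full; the proofs are below) =====
def Claim_equal_pair_to_list_dictionary : Prop := ∀ (l : List Int), Dom_pair_to_list_dictionary l → Spec_pair_to_list_dictionary l (pair_to_list_dictionary l)

-- ===== LEMMAS AND PROOFS =====

lemma zipSelf_short {l : List Int} (h : l.length ≤ 1) : zipSelf l = [] := by
  match l with
  | [] => rfl
  | [a] => rfl
  | a :: b :: t => simp at h

lemma zipSelf_drop (l : List Int) (m : Nat) (h : m + 2 ≤ l.length) :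
    zipSelf (l.drop m) =
      (l[m]'(by omega), l[m+1]'(by omega)) :: zipSelf (l.drop (m + 2)) := by
  rw [List.drop_eq_getElem_cons (by omega : m < l.length),
      List.drop_eq_getElem_cons (by omega : m + 1 < l.length)]
  rfl

lemma pairLoopA_eq (l : List Int) (i : Int) (d : PySem.Dict Int Int) (hi : 0 ≤ i) :
    pairLoopA l (l.length : Int) i d =
      (zipSelf (l.drop i.toNat)).foldl (fun d p => d.insert p.1 p.2) d := by
  by_cases h : i ≤ (l.length : Int) - 2
  · have hm : i.toNat + 2 ≤ l.length := by omega
    have hk : PySem.List.pyGet? l i = l[i.toNat]? := by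
      rw [show i = ((i.toNat : Nat) : Int) by omega]
      exact PySem.List.pyGet?_natCast l i.toNat
    have hv : PySem.List.pyGet? l (i + 1) = l[i.toNat + 1]? := by
      rw [show i + 1 = ((i.toNat + 1 : Nat) : Int) by omega]
      exact PySem.List.pyGet?_natCast l (i.toNat + 1)
    rw [pairLoopA, dif_pos h, hk, hv,
        List.getElem?_eq_getElem (by omega), List.getElem?_eq_getElem (by omega)]
    dsimp only
    have ih := pairLoopA_eq l (i + 2) (d.insert (l[i.toNat]'(by omega)) (l[i.toNat + 1]'(by omega))) (by omega)
    have h2 : (i + 2).toNat = i.toNat + 2 := by omega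
    rw [ih, h2, zipSelf_drop l i.toNat hm]
    rfl
  · rw [pairLoopA, dif_neg h, zipSelf_short (by simp; omega)]
    rfl
termination_by (l.length - i.toNat : Nat)
decreasing_by omega

-- ===== VERDICT (by name: the statement is the Claim_ definition above) =====
theorem pair_to_list_dictionary_spec : Claim_equal_pair_to_list_dictionary := by
  intro l _
  unfold Spec_pair_to_list_dictionary pair_to_list_dictionary pair_to_list_dictionary_alt
  rw [pairLoopA_eq l 0 PySem.Dict.empty le_rfl]
  rfl
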